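-- pv_equiv track=rewrite | github.com/drboom16/2026-recruitment-technical-assessment | backend/py_template/devdonalds.py | parse_handwriting
-- ===== SOURCE A (Python) =====
-- def parse_handwriting(recipeName: str):
-- 	# Replace hyphens and underscores with spaces
-- 	s = recipeName.replace('-', ' ').replace('_', ' ')
-- 	# Keep only letters and spaces
-- 	s = ''.join(c for c in s if c.isalpha() or c.isspace())
-- 	# Collapse multiple spaces, trim
-- 	s = ' '.join(s.split())
-- 	# Capitalise each word
-- 	s = ' '.join(word.capitalize() for word in s.split())
--
-- 	if len(s) == 0: # None if empty
-- 		return None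
-- 	return s
-- ===== SOURCE B (Python) =====
-- def parse_handwriting(recipeName: str):
--     # Single scan: letters are accumulated into the current word (upper at word
--     # start, lower otherwise); whitespace and '-'/'_' end the word; anything
--     # else is deleted without ending the word.
--     words = []
--     buf = ''
--     for c in recipeName:
--         if c.isalpha():
--             buf += c.upper() if not buf else c.lower()
--         elif c.isspace() or c == '-' or c == '_':
--             if buf:
--                 words.append(buf)
--                 buf = ''
--     if buf:
--         words.append(buf)
--     return ' '.join(words) if words else None
-- ===== Notes on version B (the rewrite author's own statement) =====
-- stated objective: alternative
-- what changed: Replaced A's five string passes (two replaces, a filter, two split/join rounds with per-word capitalize) by one left-to-right character scan maintaining a current-word buffer and a word list, capitalizing at word starts on the fly.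
import Mathlib
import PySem

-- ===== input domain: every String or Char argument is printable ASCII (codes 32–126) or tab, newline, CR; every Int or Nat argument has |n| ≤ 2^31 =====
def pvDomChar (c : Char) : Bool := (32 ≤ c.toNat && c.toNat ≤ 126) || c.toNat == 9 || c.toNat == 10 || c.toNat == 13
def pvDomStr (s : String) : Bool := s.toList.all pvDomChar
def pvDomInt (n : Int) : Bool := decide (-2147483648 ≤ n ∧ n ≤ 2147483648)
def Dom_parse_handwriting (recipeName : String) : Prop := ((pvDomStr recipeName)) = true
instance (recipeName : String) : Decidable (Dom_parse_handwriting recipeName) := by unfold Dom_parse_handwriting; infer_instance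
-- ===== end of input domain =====

-- B replaces A's five string passes (two replaces, filter, two split/join rounds) by one character scan with a word buffer; alternative decomposition, same O(n) cost.


-- ===== PORT A =====
-- Python str.capitalize(): first char uppercased, rest lowercased (ported by hand, exact on ASCII; PySem has no capitalize)
def pyCapitalize (w : List Char) : List Char :=
  match w with
  | [] => []
  | c :: rest => PySem.Chars.upperChar c :: PySem.Chars.lower rest

def parse_handwriting (recipeName : String) : Option String :=
  let s1 := PySem.Chars.replace recipeName.toList ['-'] [' ']
  let s2 := PySem.Chars.replace s1 ['_'] [' ']
  let s3 := s2.filter (fun c => PySem.Chars.isalpha c || PySem.Chars.isspace c)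
  let s4 := PySem.Chars.join [' '] (PySem.Chars.split₀ s3)
  let s5 := PySem.Chars.join [' '] ((PySem.Chars.split₀ s4).map pyCapitalize)
  if s5.length = 0 then none else some (String.ofList s5)

-- ===== PORT B =====
-- one step of B's scan: letter → extend buffer (upper at word start, lower inside); whitespace/'-'/'_' → flush buffer; else skip
def pvStepB (st : List (List Char) × List Char) (c : Char) : List (List Char) × List Char :=
  if PySem.Chars.isalpha c then
    (st.1, st.2 ++ [if st.2.isEmpty then PySem.Chars.upperChar c else PySem.Chars.lowerChar c])
  else if PySem.Chars.isspace c || c == '-' || c == '_' then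
    (if st.2.isEmpty then st.1 else st.1 ++ [st.2], [])
  else st

def parse_handwriting_alt (recipeName : String) : Option String :=
  let st := recipeName.toList.foldl pvStepB ([], [])
  let words := if st.2.isEmpty then st.1 else st.1 ++ [st.2]
  if words.isEmpty then none else some (String.ofList (PySem.Chars.join [' '] words))

-- ===== PRECONDITION & SPEC =====
def Spec_parse_handwriting (recipeName : String) (out : Option String) : Prop := out = parse_handwriting_alt recipeName
instance (recipeName : String) (out : Option String) : Decidable (Spec_parse_handwriting recipeName out) := by unfold Spec_parse_handwriting; infer_instance

-- ===== CLAIM (what is proved, stated in full; the proofs are below) =====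
def Claim_equal_parse_handwriting : Prop := ∀ (recipeName : String), Dom_parse_handwriting recipeName → Spec_parse_handwriting recipeName (parse_handwriting recipeName)

-- ===== LEMMAS AND PROOFS =====

-- substitution performed by A's two replaces: '-' and '_' become ' '
def pvSigma (c : Char) : Char := if c = '-' then ' ' else if c = '_' then ' ' else c
-- chars B's scan reacts to (= chars A's filter keeps, after substitution)
def pvKeep (c : Char) : Bool :=
  PySem.Chars.isalpha c || PySem.Chars.isspace c || c == '-' || c == '_'
-- plain tokenizer mirroring split₀.go without the reversed accumulator
def pvTok : List Char → List Char → List (List Char)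
  | [], cur => if cur.isEmpty then [] else [cur.reverse]
  | c :: rest, cur =>
    if PySem.Chars.isspace c then
      if cur.isEmpty then pvTok rest [] else cur.reverse :: pvTok rest []
    else pvTok rest (c :: cur)
-- B's step on an already-substituted alpha-or-space char
def pvStepB' (st : List (List Char) × List Char) (c : Char) : List (List Char) × List Char :=
  if PySem.Chars.isspace c then
    (if st.2.isEmpty then st.1 else st.1 ++ [st.2], [])
  else if PySem.Chars.isalpha c then
    (st.1, st.2 ++ [if st.2.isEmpty then PySem.Chars.upperChar c else PySem.Chars.lowerChar c])
  else st
-- B's final flush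
def pvFin (st : List (List Char) × List Char) : List (List Char) :=
  if st.2.isEmpty then st.1 else st.1 ++ [st.2]

theorem pv_space_not_alpha {c : Char} (h : PySem.Chars.isspace c = true) :
    PySem.Chars.isalpha c = false := by
  rw [PySem.Chars.isspace] at h
  rw [PySem.Chars.isalpha, PySem.Chars.isupper, PySem.Chars.islower]
  simp only [Bool.or_eq_true, Bool.and_eq_true, decide_eq_true_eq] at h
  simp only [Bool.or_eq_false_iff, Bool.and_eq_false_iff, decide_eq_false_iff_not, not_le,
    Char.le_def, UInt32.le_iff_toNat_le, Char.toNat,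
    show 'A'.val.toNat = 65 from rfl, show 'Z'.val.toNat = 90 from rfl,
    show 'a'.val.toNat = 97 from rfl, show 'z'.val.toNat = 122 from rfl] at *
  omega

theorem pv_replace_go (a b : Char) :
    ∀ (l : List Char) (fuel : Nat) (acc : List Char), l.length ≤ fuel →
      PySem.Chars.replace.go [a] [b] fuel l acc
        = acc.reverse ++ l.map (fun c => if c = a then b else c) := by
  intro l
  induction l with
  | nil => intro fuel acc h; cases fuel <;> simp [PySem.Chars.replace.go]
  | cons c t ih =>
    intro fuel acc h
    cases fuel with
    | zero => simp at h
    | succ n =>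
      simp only [PySem.Chars.replace.go]
      by_cases hc : c = a
      · subst hc
        have : List.isPrefixOf [c] (c :: t) = true := by simp [List.isPrefixOf]
        rw [if_pos this]
        simp only [List.length_cons, List.length_nil, List.drop_succ_cons, List.drop_zero]
        rw [ih n _ (by simpa using Nat.le_of_succ_le_succ h)]
        simp
      · have : List.isPrefixOf [a] (c :: t) = false := by
          simp [List.isPrefixOf]; exact fun hh => (hc hh.symm).elim
        rw [if_neg (by simp [this])]
        rw [ih n _ (by simpa using Nat.le_of_succ_le_succ h)]
        simp [hc]

theorem pv_replace_single (cs : List Char) (a b : Char) :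
    PySem.Chars.replace cs [a] [b] = cs.map (fun c => if c = a then b else c) := by
  unfold PySem.Chars.replace
  simp [pv_replace_go a b cs cs.length [] le_rfl]

theorem pv_split_go (rest : List Char) : ∀ (cur : List Char) (acc : List (List Char)),
    PySem.Chars.split₀.go rest cur acc = acc.reverse ++ pvTok rest cur := by
  induction rest with
  | nil => intro cur acc; simp only [PySem.Chars.split₀.go, pvTok]; split <;> simp
  | cons c t ih =>
    intro cur acc
    simp only [PySem.Chars.split₀.go, pvTok]
    by_cases hs : PySem.Chars.isspace c = true
    · rw [if_pos hs, if_pos hs]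
      by_cases hc : cur.isEmpty = true
      · rw [if_pos hc, if_pos hc, ih]
      · rw [if_neg hc, if_neg hc, ih]; simp
    · rw [if_neg hs, if_neg hs, ih]

theorem pv_split₀_eq_tok (s : List Char) : PySem.Chars.split₀ s = pvTok s [] := by
  unfold PySem.Chars.split₀; rw [pv_split_go]; simp

theorem pv_tok_words (rest : List Char) : ∀ (cur : List Char),
    (∀ c ∈ cur, PySem.Chars.isspace c = false) →
    ∀ w ∈ pvTok rest cur, w ≠ [] ∧ ∀ c ∈ w, PySem.Chars.isspace c = false := by
  induction rest with
  | nil =>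
    intro cur hcur w hw
    simp only [pvTok] at hw
    split at hw
    · simp at hw
    · next hne =>
      simp at hw; subst hw
      constructor
      · simp; intro h; subst h; simp at hne
      · intro c hc; exact hcur c (by simpa using hc)
  | cons c t ih =>
    intro cur hcur w hw
    simp only [pvTok] at hw
    by_cases hs : PySem.Chars.isspace c = true
    · rw [if_pos hs] at hw
      split at hw
      · exact ih [] (by simp) w hw
      · next hne =>
        rcases List.mem_cons.mp hw with h | h
        · subst h
          refine ⟨by simp; intro h; subst h; simp at hne, fun d hd => hcur d (by simpa using hd)⟩
        · exact ih [] (by simp) w h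
    · rw [if_neg hs] at hw
      refine ih (c :: cur) ?_ w hw
      intro d hd
      rcases List.mem_cons.mp hd with h | h
      · subst h; simpa using hs
      · exact hcur d h

theorem pv_tok_append (w : List Char) : ∀ (cur rest : List Char),
    (∀ c ∈ w, PySem.Chars.isspace c = false) →
    pvTok (w ++ rest) cur = pvTok rest (w.reverse ++ cur) := by
  induction w with
  | nil => intro cur rest _; simp
  | cons c t ih =>
    intro cur rest hw
    have hc : PySem.Chars.isspace c = false := hw c (by simp)
    simp only [List.cons_append, pvTok, hc, Bool.false_eq_true, if_false]
    rw [ih (c :: cur) rest (fun d hd => hw d (by simp [hd]))]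
    simp

theorem pv_tok_roundtrip (ws : List (List Char))
    (h : ∀ w ∈ ws, w ≠ [] ∧ ∀ c ∈ w, PySem.Chars.isspace c = false) :
    pvTok (PySem.Chars.join [' '] ws) [] = ws := by
  induction ws with
  | nil => rw [PySem.Chars.join_nil]; simp [pvTok]
  | cons w ws ih =>
    have hw := h w (by simp)
    have hrest : ∀ v ∈ ws, v ≠ [] ∧ ∀ c ∈ v, PySem.Chars.isspace c = false :=
      fun v hv => h v (by simp [hv])
    cases ws with
    | nil =>
      rw [PySem.Chars.join_singleton]
      rw [show w = w ++ [] by simp, pv_tok_append w [] [] hw.2]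
      simp only [pvTok, List.append_nil]
      rw [if_neg (by simp [hw.1])]
      simp
    | cons w2 ws2 =>
      rw [PySem.Chars.join_cons_cons]
      rw [show w ++ [' '] ++ PySem.Chars.join [' '] (w2 :: ws2)
            = w ++ (' ' :: PySem.Chars.join [' '] (w2 :: ws2)) by simp]
      rw [pv_tok_append w [] _ hw.2]
      simp only [pvTok, List.append_nil]
      rw [if_pos (by decide)]
      rw [if_neg (by simp [hw.1])]
      rw [ih hrest]
      simp

theorem pv_cap_snoc (u : List Char) (c : Char) :
    pyCapitalize (u ++ [c]) =
      pyCapitalize u ++ [if u.isEmpty then PySem.Chars.upperChar c else PySem.Chars.lowerChar c] := by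
  cases u with
  | nil => simp [pyCapitalize, PySem.Chars.lower]
  | cons d r => simp [pyCapitalize, PySem.Chars.lower]

theorem pv_cap_isEmpty (u : List Char) : (pyCapitalize u).isEmpty = u.isEmpty := by
  cases u <;> simp [pyCapitalize]

theorem pv_inv (t : List Char)
    (ht : ∀ c ∈ t, PySem.Chars.isalpha c = true ∨ PySem.Chars.isspace c = true) :
    ∀ ws cur,
      pvFin (t.foldl pvStepB' (ws, pyCapitalize cur.reverse)) =
        ws ++ (pvTok t cur).map pyCapitalize := by
  induction t with
  | nil =>
    intro ws cur
    simp only [List.foldl_nil, pvTok, pvFin]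
    by_cases hc : cur.isEmpty = true
    · have hn : cur = [] := by simpa [List.isEmpty_iff] using hc
      subst hn; simp [pyCapitalize]
    · rw [if_neg (by rw [pv_cap_isEmpty]; simpa using hc), if_neg hc]
      simp
  | cons c rest ih =>
    intro ws cur
    have hrest : ∀ d ∈ rest, PySem.Chars.isalpha d = true ∨ PySem.Chars.isspace d = true :=
      fun d hd => ht d (by simp [hd])
    by_cases hs : PySem.Chars.isspace c = true
    · have hflush : pvStepB' (ws, pyCapitalize cur.reverse) c
          = (if cur.isEmpty then ws else ws ++ [pyCapitalize cur.reverse], []) := by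
        simp only [pvStepB', hs, if_true, pv_cap_isEmpty, List.isEmpty_reverse]
      rw [List.foldl_cons, hflush]
      simp only [pvTok, hs, if_true]
      by_cases hc : cur.isEmpty = true
      · have hn : cur = [] := by simpa [List.isEmpty_iff] using hc
        subst hn
        simp only [List.isEmpty_nil, if_true]
        exact ih hrest ws []
      · rw [if_neg hc, if_neg (by simpa [List.isEmpty_iff] using hc)]
        have := ih hrest (ws ++ [pyCapitalize cur.reverse]) []
        rw [show pyCapitalize ([] : List Char).reverse = [] from rfl] at this
        rw [this]
        simp
    · have ha : PySem.Chars.isalpha c = true := by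
        rcases ht c (by simp) with h | h
        · exact h
        · exact absurd h (by simpa using hs)
      have hstep : pvStepB' (ws, pyCapitalize cur.reverse) c
          = (ws, pyCapitalize ((c :: cur).reverse)) := by
        simp only [pvStepB', hs, Bool.false_eq_true, if_false, ha, if_true,
          List.reverse_cons, pv_cap_snoc, pv_cap_isEmpty]
      rw [List.foldl_cons, hstep]
      simp only [pvTok, hs, Bool.false_eq_true, if_false]
      exact ih hrest ws (c :: cur)

theorem pv_stepB_eq (st : List (List Char) × List Char) (c : Char) :
    pvStepB st c = if pvKeep c then pvStepB' st (pvSigma c) else st := by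
  by_cases hd : c = '-'
  · subst hd
    simp [pvStepB, pvStepB', pvKeep, pvSigma,
      show PySem.Chars.isalpha '-' = false from by decide,
      show PySem.Chars.isspace '-' = false from by decide,
      show PySem.Chars.isspace ' ' = true from by decide]
  · by_cases hu : c = '_'
    · subst hu
      simp [pvStepB, pvStepB', pvKeep, pvSigma,
        show PySem.Chars.isalpha '_' = false from by decide,
        show PySem.Chars.isspace '_' = false from by decide,
        show PySem.Chars.isspace ' ' = true from by decide]
    · have hs2 : pvSigma c = c := by simp [pvSigma, hd, hu]
      by_cases ha : PySem.Chars.isalpha c = true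
      · have hs : PySem.Chars.isspace c = false := by
          by_cases h : PySem.Chars.isspace c = true
          · exact absurd ha (by simp [pv_space_not_alpha h])
          · simpa using h
        simp [pvStepB, pvStepB', pvKeep, hs2, ha, hs]
      · by_cases hs : PySem.Chars.isspace c = true
        · simp [pvStepB, pvStepB', pvKeep, hs2, ha, hs]
        · simp [pvStepB, pvKeep, ha, hs, hd, hu]

theorem pv_join_ne_nil (ws : List (List Char)) (h : ∀ w ∈ ws, w ≠ []) (hne : ws ≠ []) :
    PySem.Chars.join [' '] ws ≠ [] := by
  cases ws with
  | nil => exact absurd rfl hne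
  | cons w ws2 =>
    cases ws2 with
    | nil => rw [PySem.Chars.join_singleton]; exact h w (by simp)
    | cons w2 r => rw [PySem.Chars.join_cons_cons]; simp

-- ===== VERDICT (by name: the statement is the Claim_ definition above) =====
theorem parse_handwriting_spec : Claim_equal_parse_handwriting := by
  intro s _
  simp only [Spec_parse_handwriting, parse_handwriting, parse_handwriting_alt]
  rw [pv_replace_single, pv_replace_single, List.map_map]
  rw [show ((fun c => if c = '_' then ' ' else c) ∘ fun c => if c = '-' then ' ' else c) = pvSigma by
    funext c; by_cases h1 : c = '-' <;> by_cases h2 : c = '_' <;> simp [pvSigma, h1, h2]]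
  rw [List.filter_map]
  rw [show ((fun c => PySem.Chars.isalpha c || PySem.Chars.isspace c) ∘ pvSigma) = pvKeep by
    funext c
    by_cases h1 : c = '-'
    · subst h1; decide
    · by_cases h2 : c = '_'
      · subst h2; decide
      · have e1 : (c == '-') = false := beq_eq_false_iff_ne.mpr h1
        have e2 : (c == '_') = false := beq_eq_false_iff_ne.mpr h2
        simp [pvSigma, pvKeep, h1, h2, e1, e2]]
  have hAS : ∀ d ∈ (s.toList.filter pvKeep).map pvSigma,
      PySem.Chars.isalpha d = true ∨ PySem.Chars.isspace d = true := by
    intro d hd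
    rcases List.mem_map.mp hd with ⟨c, hcmem, rfl⟩
    have hk : pvKeep c = true := (List.mem_filter.mp hcmem).2
    by_cases h1 : c = '-'
    · subst h1; right; decide
    · by_cases h2 : c = '_'
      · subst h2; right; decide
      · rw [show pvSigma c = c by simp [pvSigma, h1, h2]]
        simp only [pvKeep, h1, h2, Bool.or_eq_true, beq_iff_eq, or_false] at hk
        exact hk
  have hWords := pv_tok_words ((s.toList.filter pvKeep).map pvSigma) [] (by simp)
  simp only [pv_split₀_eq_tok]
  rw [pv_tok_roundtrip _ hWords]
  have hB : s.toList.foldl pvStepB (([] : List (List Char)), ([] : List Char))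
      = ((s.toList.filter pvKeep).map pvSigma).foldl pvStepB' ([], []) := by
    calc s.toList.foldl pvStepB ([], [])
        = s.toList.foldl (fun st c => if pvKeep c then pvStepB' st (pvSigma c) else st) ([], []) :=
          PySem.List.foldl_congr_mem _ _ _ _ (fun acc x _ => pv_stepB_eq acc x)
      _ = (s.toList.filter pvKeep).foldl (fun st c => pvStepB' st (pvSigma c)) ([], []) :=
          PySem.List.foldl_if_eq_foldl_filter _ _ _ _
      _ = ((s.toList.filter pvKeep).map pvSigma).foldl pvStepB' ([], []) :=
          (List.foldl_map).symm
  rw [hB]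
  have hfin :
      (if (((s.toList.filter pvKeep).map pvSigma).foldl pvStepB' ([], [])).2.isEmpty then
        (((s.toList.filter pvKeep).map pvSigma).foldl pvStepB' ([], [])).1
      else
        (((s.toList.filter pvKeep).map pvSigma).foldl pvStepB' ([], [])).1 ++
          [(((s.toList.filter pvKeep).map pvSigma).foldl pvStepB' ([], [])).2])
      = (pvTok ((s.toList.filter pvKeep).map pvSigma) []).map pyCapitalize := by
    have h := pv_inv _ hAS [] []
    simpa [pvFin] using h
  rw [hfin]
  have hNE : ∀ w ∈ (pvTok ((s.toList.filter pvKeep).map pvSigma) []).map pyCapitalize, w ≠ [] := by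
    intro w hw
    rcases List.mem_map.mp hw with ⟨v, hv, rfl⟩
    have hvne := (hWords v hv).1
    cases v with
    | nil => exact absurd rfl hvne
    | cons d r => simp [pyCapitalize]
  by_cases hW : (pvTok ((s.toList.filter pvKeep).map pvSigma) []).map pyCapitalize = []
  · rw [hW, PySem.Chars.join_nil]
    simp
  · rw [if_neg (by simpa [List.length_eq_zero_iff] using pv_join_ne_nil _ hNE hW)]
    rw [if_neg (by simpa [List.isEmpty_iff] using hW)]
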